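-- pv_equiv track=rewrite | github.com/DancingOnAir/LeetcodePythonSolution | String/1542_find_longest_awesome_substring.py | longestAwesome1
-- ===== SOURCE A (Python) =====
-- from collections import Counter
--
-- def longestAwesome1(s: str) -> int:
--     n = len(s)
--     if n < 2:
--         return n
--
--     res = 0
--     for i in range(n):
--         for j in range(i+1, n+1):
--             ss = s[i:j]
--             c = Counter(ss)
--             if sum([1 for v in c.values() if (v & 0b1) == 1]) < 2:
--                 res = max(res, len(ss))
--     return res
-- ===== SOURCE B (Python) =====
-- def longestAwesome1(s: str) -> int:
--     n = len(s)
--     # prefix parity sets: pref[k] = set of chars with odd count in s[:k]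
--     pref = [frozenset()]
--     cur = frozenset()
--     for ch in s:
--         cur = cur ^ {ch}
--         pref.append(cur)
--     res = 0
--     for i in range(n):
--         for j in range(i + 1, n + 1):
--             if len(pref[i] ^ pref[j]) <= 1:
--                 res = max(res, j - i)
--     return res
-- ===== Notes on version B (the rewrite author's own statement) =====
-- stated objective: faster
-- what changed: Instead of building a Counter for every substring and counting its odd values, B computes prefix character-parity sets once and tests each (i,j) pair by the size of the symmetric difference of two prefix sets, removing the per-substring scan.
import Mathlib
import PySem

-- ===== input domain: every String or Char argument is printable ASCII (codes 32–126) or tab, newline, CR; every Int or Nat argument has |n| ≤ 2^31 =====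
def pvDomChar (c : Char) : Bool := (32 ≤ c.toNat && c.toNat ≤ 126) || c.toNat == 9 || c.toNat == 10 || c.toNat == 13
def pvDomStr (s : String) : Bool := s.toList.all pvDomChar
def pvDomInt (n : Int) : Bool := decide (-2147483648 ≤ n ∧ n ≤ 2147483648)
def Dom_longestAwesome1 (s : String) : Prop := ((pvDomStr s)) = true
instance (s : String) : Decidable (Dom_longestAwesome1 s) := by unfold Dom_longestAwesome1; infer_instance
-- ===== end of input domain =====

-- B replaces A's per-substring Counter scan by prefix character-parity sets compared pairwise (measured faster; return value only, no mutation).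

-- ===== PORT A =====
def longestAwesome1 (s : String) : Int :=
  let n : Int := s.toList.length
  if n < 2 then n
  else
    (PySem.List.pyRange 0 n 1).foldl (fun res i =>
      (PySem.List.pyRange (i + 1) (n + 1) 1).foldl (fun res j =>
        let ss := PySem.List.slice s.toList (some i) (some j)
        let c := PySem.Dict.counter ss
        if (((c.values.filter (fun v => PySem.Int.band v 1 == 1)).map (fun _ => (1 : Int))).sum) < 2
        then max res (ss.length : Int) else res) res) 0

-- ===== PORT B =====
def longestAwesome1_alt (s : String) : Int :=
  let n : Int := s.toList.length
  let pref : List (PySem.Set Char) :=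
    (s.toList.foldl
      (fun (p : List (PySem.Set Char) × PySem.Set Char) ch =>
        let cur := PySem.Set.symmDiff p.2 (PySem.Set.ofList [ch])
        (p.1 ++ [cur], cur))
      ([PySem.Set.empty], PySem.Set.empty)).1
  (PySem.List.pyRange 0 n 1).foldl (fun res i =>
    (PySem.List.pyRange (i + 1) (n + 1) 1).foldl (fun res j =>
      if (PySem.Set.symmDiff (PySem.List.pyGetD pref i PySem.Set.empty)
            (PySem.List.pyGetD pref j PySem.Set.empty)).length ≤ 1
      then max res (j - i) else res) res) 0

-- ===== PRECONDITION & SPEC =====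
def Spec_longestAwesome1 (s : String) (out : Int) : Prop := out = longestAwesome1_alt s
instance (s : String) (out : Int) : Decidable (Spec_longestAwesome1 s out) := by unfold Spec_longestAwesome1; infer_instance

-- ===== CLAIM (what is proved, stated in full; the proofs are below) =====
def Claim_equal_longestAwesome1 : Prop := ∀ (s : String), Dom_longestAwesome1 s → Spec_longestAwesome1 s (longestAwesome1 s)

-- ===== LEMMAS AND PROOFS =====

-- the parity-toggle step of B's first loop ('cur = cur ^ {ch}')
def pvG (st : PySem.Set Char) (c : Char) : PySem.Set Char :=
  PySem.Set.symmDiff st (PySem.Set.ofList [c])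

-- set of characters with odd count in t
def pvOdds (t : List Char) : PySem.Set Char := t.foldl pvG PySem.Set.empty

theorem pvG_mem (st : PySem.Set Char) (c x : Char) :
    x ∈ pvG st c ↔ (x ∈ st ∧ x ≠ c) ∨ (x = c ∧ x ∉ st) := by
  simp [pvG, PySem.Set.mem_symmDiff, PySem.Set.mem_ofList]

theorem pvFoldl_g_mem (t : List Char) (st : PySem.Set Char) (x : Char) :
    x ∈ t.foldl pvG st ↔
      ((x ∈ st ∧ t.count x % 2 = 0) ∨ (x ∉ st ∧ t.count x % 2 = 1)) := by
  induction t generalizing st with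
  | nil => simp
  | cons c t ih =>
    rw [List.foldl_cons, ih]
    simp only [pvG_mem, List.count_cons]
    by_cases hxc : x = c
    · subst hxc
      simp only [beq_self_eq_true, if_pos, ne_eq, not_true_eq_false, and_false, false_or,
        true_and]
      rcases Nat.mod_two_eq_zero_or_one (t.count x) with hp | hp <;>
        rw [Nat.add_mod, hp] <;> simp
    · have hcx : (c == x) = false := by simp [Ne.symm hxc]
      simp [hcx, hxc]

theorem pvFoldl_g_nodup (t : List Char) (st : PySem.Set Char) (h : st.Nodup) :
    (t.foldl pvG st).Nodup := by
  induction t generalizing st with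
  | nil => exact h
  | cons c t ih => exact ih _ (PySem.Set.nodup_symmDiff _ _ h (by simp))

theorem pvOdds_mem (t : List Char) (x : Char) :
    x ∈ pvOdds t ↔ t.count x % 2 = 1 := by
  simp [pvOdds, pvFoldl_g_mem, PySem.Set.empty]

theorem pvOdds_nodup (t : List Char) : (pvOdds t).Nodup :=
  pvFoldl_g_nodup t _ (by simp [PySem.Set.empty])

-- B's prefix-building loop step
def pvStep (p : List (PySem.Set Char) × PySem.Set Char) (ch : Char) :
    List (PySem.Set Char) × PySem.Set Char :=
  (p.1 ++ [PySem.Set.symmDiff p.2 (PySem.Set.ofList [ch])],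
   PySem.Set.symmDiff p.2 (PySem.Set.ofList [ch]))

theorem pvPref_general (t : List Char) (acc : List (PySem.Set Char)) (st : PySem.Set Char) :
    (t.foldl pvStep (acc, st)).1
      = acc ++ (List.range t.length).map (fun k => (t.take (k + 1)).foldl pvG st) := by
  induction t generalizing acc st with
  | nil => simp
  | cons c t ih =>
    have hs : pvStep (acc, st) c = (acc ++ [pvG st c], pvG st c) := rfl
    rw [List.foldl_cons, hs, ih]
    rw [List.length_cons, List.range_succ_eq_map, List.map_cons, List.map_map]
    simp [pvG, List.append_assoc, Function.comp]

theorem pvPref_eq (l : List Char) :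
    (l.foldl pvStep ([PySem.Set.empty], PySem.Set.empty)).1
      = (List.range (l.length + 1)).map (fun k => pvOdds (l.take k)) := by
  rw [pvPref_general, List.range_succ_eq_map, List.map_cons, List.map_map]
  rfl

theorem pvPref_get (l : List Char) (k : Nat) (hk : k ≤ l.length) :
    PySem.List.pyGetD (l.foldl pvStep ([PySem.Set.empty], PySem.Set.empty)).1 (k : Int)
        PySem.Set.empty
      = pvOdds (l.take k) := by
  rw [PySem.List.pyGetD_natCast, pvPref_eq, List.getD_eq_getElem?_getD]
  simp [Nat.lt_succ_of_le hk]

theorem pvSumOnes {α : Type} (xs : List α) : (xs.map (fun _ => (1 : Int))).sum = xs.length := by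
  induction xs with
  | nil => rfl
  | cons a t ih => simp only [List.map_cons, List.sum_cons, ih, List.length_cons]; push_cast; omega

theorem pvBand_pred (cnt : Nat) :
    (PySem.Int.band ((cnt : Nat) : Int) 1 == 1) = (cnt % 2 == 1) := by
  rw [show (1 : Int) = ((1 : Nat) : Int) from rfl, PySem.Int.band_natCast, Nat.and_one_is_mod]
  rcases Nat.mod_two_eq_zero_or_one cnt with h | h <;> simp [h]

-- A's inner sum is the number of distinct characters of ss with odd count
theorem pvSumA (ss : List Char) :
    ((((PySem.Dict.counter ss).values.filter (fun v => PySem.Int.band v 1 == 1)).map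
        (fun _ => (1 : Int))).sum)
      = ((PySem.Set.ofList ss).countP (fun k => ss.count k % 2 == 1) : Int) := by
  simp only [PySem.Dict.values, PySem.Dict.items_counter, List.map_map, List.filter_map]
  have hpred : ∀ k ∈ PySem.Set.ofList ss,
      ((fun v => PySem.Int.band v 1 == 1) ∘ ((fun p : Char × Int => p.2) ∘
        (fun k : Char => (k, (ss.count k : Int))))) k = (ss.count k % 2 == 1) := by
    intro k _; simpa using pvBand_pred (ss.count k)
  rw [List.filter_congr hpred,
    show ((fun _ => (1:Int)) ∘ ((fun p : Char × Int => p.2) ∘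
        (fun k : Char => (k, (ss.count k : Int))))) = (fun _ : Char => (1:Int)) from rfl,
    pvSumOnes, ← List.countP_eq_length_filter]

-- B's inner length is the same number
theorem pvLenB (l : List Char) (i j : Nat) (hij : i ≤ j) (_hj : j ≤ l.length) :
    (PySem.Set.symmDiff (pvOdds (l.take i)) (pvOdds (l.take j))).length
      = (PySem.Set.ofList ((l.drop i).take (j - i))).countP
          (fun k => ((l.drop i).take (j - i)).count k % 2 == 1) := by
  set ss := (l.drop i).take (j - i) with hss
  have htj : l.take j = l.take i ++ ss := by
    rw [hss, ← List.take_add, Nat.add_sub_cancel' hij]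
  have hmem : ∀ x, x ∈ PySem.Set.symmDiff (pvOdds (l.take i)) (pvOdds (l.take j)) ↔
      ss.count x % 2 = 1 := by
    intro x
    rw [PySem.Set.mem_symmDiff, pvOdds_mem, pvOdds_mem, htj, List.count_append]
    omega
  have h2 : ∀ x, x ∈ (PySem.Set.ofList ss).filter (fun k => ss.count k % 2 == 1) ↔
      ss.count x % 2 = 1 := by
    intro x
    simp only [List.mem_filter, PySem.Set.mem_ofList, beq_iff_eq]
    constructor
    · exact fun h => h.2
    · exact fun h => ⟨List.count_pos_iff.mp (by omega), h⟩
  have hperm := (List.perm_ext_iff_of_nodup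
      (PySem.Set.nodup_symmDiff _ _ (pvOdds_nodup _) (pvOdds_nodup _))
      ((PySem.Set.nodup_ofList ss).filter _)).mpr
      (fun x => (hmem x).trans ((h2 x).symm))
  rw [hperm.length_eq, ← List.countP_eq_length_filter]

theorem pvMain (s : String) : longestAwesome1 s = longestAwesome1_alt s := by
  unfold longestAwesome1 longestAwesome1_alt
  by_cases hn2 : ((s.toList.length : Int) < 2)
  · rcases hl : s.toList with _ | ⟨c, _ | ⟨d, t⟩⟩
    · rfl
    · simp only [List.length_cons, List.length_nil]
      rfl
    · rw [hl] at hn2; simp at hn2; omega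
  · rw [if_neg hn2]
    have hstep : (fun (p : List (PySem.Set Char) × PySem.Set Char) ch =>
        let cur := PySem.Set.symmDiff p.2 (PySem.Set.ofList [ch])
        (p.1 ++ [cur], cur)) = pvStep := rfl
    rw [hstep]
    apply PySem.List.foldl_congr_mem
    intro res iI hiI
    rw [PySem.List.mem_pyRange_iff_of_pos (by norm_num)] at hiI
    obtain ⟨hi0, hin, -⟩ := hiI
    apply PySem.List.foldl_congr_mem
    intro res2 jI hjI
    rw [PySem.List.mem_pyRange_iff_of_pos (by norm_num)] at hjI
    obtain ⟨hj0, hjn, -⟩ := hjI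
    have hiN : iI = ((iI.toNat : Nat) : Int) := (Int.toNat_of_nonneg hi0).symm
    have hjN : jI = ((jI.toNat : Nat) : Int) := (Int.toNat_of_nonneg (by omega)).symm
    set i := iI.toNat
    set j := jI.toNat
    have hij : i < j := by omega
    have hjle : j ≤ s.toList.length := by omega
    rw [hiN, hjN, PySem.List.slice_natCast,
      pvPref_get _ _ (by omega), pvPref_get _ _ hjle]
    have hcond : ((((PySem.Dict.counter ((s.toList.drop i).take (j - i))).values.filter
          (fun v => PySem.Int.band v 1 == 1)).map (fun _ => (1 : Int))).sum < 2)
        ↔ ((PySem.Set.symmDiff (pvOdds (s.toList.take i)) (pvOdds (s.toList.take j))).length ≤ 1) := by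
      rw [pvSumA, pvLenB s.toList i j (by omega) hjle]
      constructor <;> intro h <;> omega
    have hlen : ((((s.toList.drop i).take (j - i)).length : Nat) : Int)
        = ((j : Nat) : Int) - ((i : Nat) : Int) := by
      rw [List.length_take, List.length_drop]
      omega
    exact if_congr hcond (by rw [hlen]) rfl

-- ===== VERDICT (by name: the statement is the Claim_ definition above) =====
theorem longestAwesome1_spec : Claim_equal_longestAwesome1 := by
  intro s _
  unfold Spec_longestAwesome1
  exact pvMain s
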